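-- pv_equiv track=rewrite | github.com/vamonte/tracks_combination | main.py | _check_tracks_length
-- ===== SOURCE A (Python) =====
-- import operator
-- from typing import List, Optional, Tuple
--
-- def validate_tracks_length(
--     tracks_length: Tuple[int],
--     indices: List[int],
--     min_length: int,
--     max_length: int,
--     tracks_count: int,
-- ):
--     tracks_list = tuple(tracks_length[i] for i in indices)
--     length = sum(tracks_list)
--     if (
--         length >= min_length
--         and length <= max_length
--         and tracks_count == len(tracks_list)
--     ):
--         return True
--     return False
--
-- def _check_tracks_length(
--     tracks_length: List[int],
--     min_length: int,
--     max_length: int,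
--     tracks_count: int,
-- ):
--     lower = operator.lt
--     if tracks_count == 1:
--         lower = operator.le
--
--     valid_tracks_length = tuple(
--         length for length in tracks_length if lower(length, max_length)
--     )
--
--     track_length_size = len(valid_tracks_length)
--     if track_length_size < tracks_count:
--         return False
--
--     indices = list(range(tracks_count))
--     if validate_tracks_length(
--         valid_tracks_length, indices, min_length, max_length, tracks_count
--     ):
--         return True
--
--     while True:
--         for i in reversed(range(tracks_count)):
--             if indices[i] != i + track_length_size - tracks_count:
--                 break
--         else:
--             return False
--         indices[i] += 1
--         for j in range(i + 1, tracks_count):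
--             indices[j] = indices[j - 1] + 1
--
--         if validate_tracks_length(
--             valid_tracks_length, indices, min_length, max_length, tracks_count
--         ):
--             return True
-- ===== SOURCE B (Python) =====
-- def _check_tracks_length(
--     tracks_length,
--     min_length,
--     max_length,
--     tracks_count,
-- ):
--     if tracks_count < 0:
--         return False
--     if tracks_count == 1:
--         valid = [x for x in tracks_length if x <= max_length]
--     else:
--         valid = [x for x in tracks_length if x < max_length]
--     if len(valid) < tracks_count:
--         return False
--     # layers[j] = set of sums achievable by picking exactly j of the scanned tracks
--     layers = [{0}] + [set() for _ in range(tracks_count)]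
--     for x in valid:
--         layers = [layers[0]] + [
--             layers[j] | {s + x for s in layers[j - 1]}
--             for j in range(1, tracks_count + 1)
--         ]
--     return any(min_length <= s <= max_length for s in layers[tracks_count])
-- ===== Notes on version B (the rewrite author's own statement) =====
-- stated objective: alternative
-- what changed: Replaced the explicit lexicographic enumeration of all C(n,k) index combinations by a bounded-cardinality subset-sum dynamic programme that keeps, for each count j<=k, the set of DISTINCT achievable sums, so duplicate partial sums collapse instead of being revisited once per combination (a large win on duplicate-heavy or small-valued tracks, same worst case when all partial sums are distinct).
import Mathlib
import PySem

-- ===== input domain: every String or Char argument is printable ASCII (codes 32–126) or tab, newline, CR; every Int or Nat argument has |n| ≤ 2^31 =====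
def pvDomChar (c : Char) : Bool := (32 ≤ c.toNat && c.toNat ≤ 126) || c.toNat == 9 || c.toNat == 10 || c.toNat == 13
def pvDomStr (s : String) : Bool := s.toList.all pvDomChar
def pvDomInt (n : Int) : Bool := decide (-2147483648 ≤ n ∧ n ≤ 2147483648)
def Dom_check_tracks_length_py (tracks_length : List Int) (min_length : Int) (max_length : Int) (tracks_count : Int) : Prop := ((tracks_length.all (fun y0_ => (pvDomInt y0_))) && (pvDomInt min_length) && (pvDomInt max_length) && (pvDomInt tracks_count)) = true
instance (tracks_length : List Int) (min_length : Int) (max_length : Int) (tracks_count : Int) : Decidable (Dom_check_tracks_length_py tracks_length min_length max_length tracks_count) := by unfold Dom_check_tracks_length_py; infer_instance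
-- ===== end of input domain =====

-- B replaces A's explicit lexicographic enumeration of k-element index combinations by a
-- bounded-cardinality subset-sum dynamic programme over sets of distinct achievable sums
-- (objective: alternative algorithm; duplicate partial sums collapse instead of being revisited).

-- ===== PORT A =====

-- tracks_length[i]: every index A ever passes is in range, so the default 0 is never taken
def pvGet (xs : List Int) (i : Int) : Int := PySem.List.pyGetD xs i 0

def validate_tracks_length_py (tracks_length : List Int) (indices : List Int)
    (min_length : Int) (max_length : Int) (tracks_count : Int) : Bool :=
  let tracks_list := indices.map (fun i => pvGet tracks_length i)
  let length := tracks_list.sum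
  decide (min_length ≤ length) && decide (length ≤ max_length) && (tracks_count == (tracks_list.length : Int))

-- the `for i in reversed(range(tracks_count)): ... break / else: return False` search
def pvFindBreak (indices : List Int) (n k : Int) : Option Int :=
  (PySem.List.pyRange 0 k 1).reverse.find? (fun i => !(pvGet indices i == i + n - k))

-- indices[i] += 1; for j in range(i+1, tracks_count): indices[j] = indices[j-1] + 1
def pvBump (indices : List Int) (i k : Int) : List Int :=
  let idx1 := PySem.List.pySetD indices i (pvGet indices i + 1)
  (PySem.List.pyRange (i + 1) k 1).foldl (fun acc j => PySem.List.pySetD acc j (pvGet acc (j - 1) + 1)) idx1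

-- the `while True` loop; the fuel argument only makes it total — pvLoopA_spec proves it never
-- runs out, because each step strictly increases the base-(n+1) value of `indices`
def pvLoopA (vs : List Int) (minL maxL k : Int) : Nat → List Int → Bool
  | 0, _ => false
  | fuel + 1, indices =>
    match pvFindBreak indices (vs.length : Int) k with
    | none => false
    | some i =>
      let indices' := pvBump indices i k
      if validate_tracks_length_py vs indices' minL maxL k then true
      else pvLoopA vs minL maxL k fuel indices'

def check_tracks_length_py (tracks_length : List Int) (min_length : Int) (max_length : Int) (tracks_count : Int) : Bool :=
  let valid := if tracks_count == 1 then tracks_length.filter (fun x => decide (x ≤ max_length))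
               else tracks_length.filter (fun x => decide (x < max_length))
  if (valid.length : Int) < tracks_count then false
  else
    let indices := PySem.List.pyRange 0 tracks_count 1
    if validate_tracks_length_py valid indices min_length max_length tracks_count then true
    else pvLoopA valid min_length max_length tracks_count ((valid.length + 1) ^ tracks_count.toNat + 1) indices

-- ===== PORT B =====

-- layers = [layers[0]] + [layers[j] | {s+x for s in layers[j-1]} for j in range(1, k+1)]:
-- the j-th new layer pairs layers[j-1] (prev) with layers[j] (cur), i.e. zips layers with its tail
def pvStepB (x : Int) (layers : List (PySem.Set Int)) : List (PySem.Set Int) :=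
  match layers with
  | [] => []
  | l0 :: rest =>
    l0 :: List.zipWith (fun prev cur => PySem.Set.union cur (prev.map (fun s => s + x))) (l0 :: rest) rest

def check_tracks_length_py_alt (tracks_length : List Int) (min_length : Int) (max_length : Int) (tracks_count : Int) : Bool :=
  if tracks_count < 0 then false
  else
    let valid := if tracks_count == 1 then tracks_length.filter (fun x => decide (x ≤ max_length))
                 else tracks_length.filter (fun x => decide (x < max_length))
    if (valid.length : Int) < tracks_count then false
    else
      let init : List (PySem.Set Int) :=
        PySem.Set.ofList [(0 : Int)] :: (List.range tracks_count.toNat).map (fun _ => (PySem.Set.empty : PySem.Set Int))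
      let final := valid.foldl (fun layers x => pvStepB x layers) init
      -- layers[tracks_count]: final has length tracks_count+1, so the default is never taken
      ((PySem.List.pyGet? final tracks_count).getD PySem.Set.empty).any
        (fun s => decide (min_length ≤ s) && decide (s ≤ max_length))

-- ===== PRECONDITION & SPEC =====
def Spec_check_tracks_length_py (tracks_length : List Int) (min_length : Int) (max_length : Int) (tracks_count : Int) (out : Bool) : Prop := out = check_tracks_length_py_alt tracks_length min_length max_length tracks_count
instance (tracks_length : List Int) (min_length : Int) (max_length : Int) (tracks_count : Int) (out : Bool) : Decidable (Spec_check_tracks_length_py tracks_length min_length max_length tracks_count out) := by unfold Spec_check_tracks_length_py; infer_instance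

-- ===== CLAIM (what is proved, stated in full; the proofs are below) =====
def Claim_equal_check_tracks_length_py : Prop := ∀ (tracks_length : List Int) (min_length : Int) (max_length : Int) (tracks_count : Int), Dom_check_tracks_length_py tracks_length min_length max_length tracks_count → Spec_check_tracks_length_py tracks_length min_length max_length tracks_count (check_tracks_length_py tracks_length min_length max_length tracks_count)

-- ===== LEMMAS AND PROOFS =====

theorem find_rev_none_iff (p : Int → Bool) (b : Nat) :
    ((PySem.List.pyRange 0 (b : Int) 1).reverse.find? p = none) ↔ ∀ j : Nat, j < b → p j = false := by
  rw [List.find?_eq_none]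
  constructor
  · intro h j hj
    have : (j : Int) ∈ (PySem.List.pyRange 0 (b:Int) 1).reverse := by
      rw [List.mem_reverse, PySem.List.mem_pyRange_one]; omega
    simpa using h _ this
  · intro h x hx
    rw [List.mem_reverse, PySem.List.mem_pyRange_one] at hx
    obtain ⟨h0, hb⟩ := hx
    have hx' : x = ((x.toNat : Nat) : Int) := by omega
    rw [hx', h x.toNat (by omega)]
    simp

theorem find_rev_some_iff (p : Int → Bool) (b : Nat) (i : Int) :
    ((PySem.List.pyRange 0 (b : Int) 1).reverse.find? p = some i) ↔
      (0 ≤ i ∧ i < b ∧ p i = true ∧ ∀ j : Int, i < j → j < b → p j = false) := by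
  induction b with
  | zero => simp [PySem.List.pyRange_one_eq_nil]; omega
  | succ m ih =>
    have hsplit : PySem.List.pyRange 0 ((m+1 : Nat) : Int) 1
        = PySem.List.pyRange 0 (m : Int) 1 ++ [(m : Int)] := by
      push_cast
      exact PySem.List.pyRange_one_succ_right (by omega)
    rw [hsplit, List.reverse_append]
    simp only [List.reverse_singleton, List.singleton_append, List.find?_cons]
    by_cases hm : p (m : Int) = true
    · simp only [hm]
      constructor
      · rintro h
        cases h
        push_cast
        refine ⟨by omega, by omega, hm, fun j h1 h2 => absurd h1 (by omega)⟩
      · rintro ⟨h0, hb, hp, hmax⟩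
        have hi : i = (m : Int) := by
          by_contra hne
          have hpm : p (m : Int) = false := hmax _ (by push_cast at hb ⊢; omega) (by push_cast; omega)
          rw [hm] at hpm; cases hpm
        rw [hi]
    · rw [Bool.not_eq_true] at hm
      rw [hm]
      simp only []
      rw [ih]
      constructor
      · rintro ⟨h0, hb, hp, hmax⟩
        refine ⟨h0, by push_cast at hb ⊢; omega, hp, fun j h1 h2 => ?_⟩
        by_cases hj : j = (m : Int)
        · rw [hj]; exact hm
        · exact hmax _ h1 (by push_cast at h2 ⊢; omega)
      · rintro ⟨h0, hb, hp, hmax⟩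
        have him : i ≠ (m : Int) := fun he => by rw [he, hm] at hp; cases hp
        refine ⟨h0, by push_cast at hb ⊢; omega, hp, fun j h1 h2 => hmax _ h1 (by push_cast; omega)⟩

theorem pvGet_eq_getD (xs : List Int) (i : Int) (h0 : 0 ≤ i) :
    pvGet xs i = xs.getD i.toNat 0 := by
  unfold pvGet
  rcases lt_or_ge i (xs.length : Int) with h | h
  · rw [PySem.List.pyGetD_eq_getElem xs 0 h0 (by simpa using h), List.getD_eq_getElem _ _ (by omega)]
  · rw [PySem.List.pyGetD_of_none, List.getD_eq_default _ _ (by omega)]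
    rw [PySem.List.pyGet?_eq_none_iff]
    simp [PySem.Raise.InRange]
    omega

theorem bumpFold (k : Int) (d : Nat) : ∀ (m : Int) (acc : List Int), 0 < m → m + d = k →
    (acc.length : Int) = k →
    ((PySem.List.pyRange m k 1).foldl (fun acc j => PySem.List.pySetD acc j (pvGet acc (j - 1) + 1)) acc).length = acc.length ∧
    (∀ j : Nat, (j : Int) < m → ((PySem.List.pyRange m k 1).foldl (fun acc j => PySem.List.pySetD acc j (pvGet acc (j - 1) + 1)) acc).getD j 0 = acc.getD j 0) ∧
    (∀ j : Nat, m ≤ (j:Int) → (j:Int) < k → ((PySem.List.pyRange m k 1).foldl (fun acc j => PySem.List.pySetD acc j (pvGet acc (j - 1) + 1)) acc).getD j 0 = acc.getD (m-1).toNat 0 + ((j:Int) - m + 1)) := by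
  induction d with
  | zero =>
    intro m acc hm hmk hlen
    rw [PySem.List.pyRange_one_eq_nil (by omega)]
    exact ⟨rfl, fun _ _ => rfl, fun j h1 h2 => by omega⟩
  | succ d ih =>
    intro m acc hm hmk hlen
    rw [PySem.List.pyRange_one_cons (by omega), List.foldl_cons]
    have hmr : (0:Int) ≤ m ∧ m < acc.length := by omega
    set acc' := PySem.List.pySetD acc m (pvGet acc (m - 1) + 1) with hacc'
    have hset : acc' = acc.set m.toNat (pvGet acc (m-1) + 1) := by
      rw [hacc', PySem.List.pySetD_of_nonneg _ _ (by omega)]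
    have hlen' : acc'.length = acc.length := by rw [hset, List.length_set]
    obtain ⟨L, Pre, Post⟩ := ih (m+1) acc' (by omega) (by omega) (by omega)
    refine ⟨by rw [L, hlen'], fun j hj => ?_, fun j h1 h2 => ?_⟩
    · rw [Pre j (by omega), hset]
      simp [List.getD, show m.toNat ≠ j by omega]
    · have hgm : acc'.getD m.toNat 0 = acc.getD (m-1).toNat 0 + 1 := by
        rw [hset, pvGet_eq_getD _ _ (by omega)]
        simp [List.getD, show m.toNat < acc.length by omega]
      rcases eq_or_lt_of_le h1 with he | hlt
      · rw [Pre j (by omega), ← he]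
        have : ((j:Int)).toNat = m.toNat := by omega
        rw [show acc'.getD j 0 = acc'.getD m.toNat 0 by rw [show j = m.toNat by omega], hgm]
        omega
      · rw [Post j (by omega) h2]
        have : acc'.getD (m + 1 - 1).toNat 0 = acc'.getD m.toNat 0 := by norm_num
        rw [this, hgm]
        omega

def IsComb (n kt : Nat) (c : List Int) : Prop :=
  c.length = kt ∧ (∀ p q : Nat, p < q → q < kt → c.getD p 0 < c.getD q 0) ∧
    (∀ p : Nat, p < kt → 0 ≤ c.getD p 0 ∧ c.getD p 0 < (n : Int))

theorem comb_gap {n kt : Nat} {c : List Int} (hc : IsComb n kt c) :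
    ∀ p q : Nat, p ≤ q → q < kt → c.getD p 0 + ((q : Int) - p) ≤ c.getD q 0 := by
  obtain ⟨-, hmono, -⟩ := hc
  intro p q hpq hq
  induction q with
  | zero => have : p = 0 := by omega
            subst this; simp
  | succ m ih =>
    rcases Nat.lt_or_ge p (m+1) with h | h
    · have := ih (by omega) (by omega)
      have h2 := hmono m (m+1) (by omega) (by omega)
      push_cast
      omega
    · have : p = m + 1 := by omega
      subst this; simp

theorem comb_ub {n kt : Nat} {c : List Int} (hc : IsComb n kt c) :
    ∀ p : Nat, p < kt → c.getD p 0 ≤ (p : Int) + n - kt := by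
  intro p hp
  have hg := comb_gap hc p (kt - 1) (by omega) (by omega)
  have hb := hc.2.2 (kt - 1) (by omega)
  push_cast at hg
  omega

theorem bump_getD {n kt : Nat} {c : List Int} (hc : IsComb n kt c) (i : Int)
    (hi0 : 0 ≤ i) (hik : i < kt) :
    (pvBump c i (kt : Int)).length = kt ∧
    (∀ j : Nat, (j : Int) < i → (pvBump c i (kt : Int)).getD j 0 = c.getD j 0) ∧
    (∀ j : Nat, i ≤ (j : Int) → j < kt → (pvBump c i (kt : Int)).getD j 0 = c.getD i.toNat 0 + 1 + ((j : Int) - i)) := by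
  unfold pvBump
  have hlen : c.length = kt := hc.1
  have hset : PySem.List.pySetD c i (pvGet c i + 1) = c.set i.toNat (pvGet c i + 1) :=
    PySem.List.pySetD_of_nonneg _ _ hi0
  set acc := c.set i.toNat (pvGet c i + 1) with hacc
  rw [hset]
  obtain ⟨L, Pre, Post⟩ := bumpFold (kt : Int) (kt - 1 - i.toNat) (i + 1) acc (by omega)
    (by push_cast; omega) (by rw [hacc, List.length_set]; push_cast; omega)
  have hgi : acc.getD i.toNat 0 = c.getD i.toNat 0 + 1 := by
    rw [hacc, pvGet_eq_getD _ _ hi0]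
    simp [List.getD, show i.toNat < c.length by omega]
  refine ⟨by rw [L, hacc, List.length_set, hlen], fun j hj => ?_, fun j h1 h2 => ?_⟩
  · rw [Pre j (by omega), hacc]
    simp [List.getD, show i.toNat ≠ j by omega]
  · rcases eq_or_lt_of_le h1 with he | hlt
    · rw [Pre j (by omega)]
      rw [show j = i.toNat by omega, hgi]
      omega
    · rw [Post j (by omega) (by push_cast; omega)]
      rw [show (i + 1 - 1 : Int).toNat = i.toNat by omega, hgi]
      omega

def LexLt (c d : List Int) : Prop :=
  ∃ p : Nat, p < c.length ∧ p < d.length ∧ (∀ q : Nat, q < p → c.getD q 0 = d.getD q 0) ∧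
    c.getD p 0 < d.getD p 0

theorem lexLt_trans {c d e : List Int} (hcd : LexLt c d) (hde : LexLt d e)
    (l1 : c.length = d.length) (l2 : d.length = e.length) : LexLt c e := by
  obtain ⟨p1, hp1c, hp1d, heq1, hlt1⟩ := hcd
  obtain ⟨p2, hp2d, hp2e, heq2, hlt2⟩ := hde
  rcases Nat.lt_trichotomy p1 p2 with h | h | h
  · exact ⟨p1, hp1c, by omega, fun q hq => (heq1 q hq).trans (heq2 q (by omega)), by rw [heq2 p1 h] at hlt1; exact hlt1⟩
  · subst h
    exact ⟨p1, hp1c, by omega, fun q hq => (heq1 q hq).trans (heq2 q hq), by omega⟩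
  · exact ⟨p2, by omega, hp2e, fun q hq => (heq1 q (by omega)).trans (heq2 q hq), by rw [heq1 p2 h]; omega⟩

def pvVal (n : Nat) (c : List Int) : Nat := c.foldl (fun a x => a * (n + 1) + x.toNat) 0

theorem pvVal_foldl_bounds (n : Nat) (l : List Int) (hl : ∀ x ∈ l, x.toNat ≤ n) :
    ∀ a : Nat, a * (n + 1) ^ l.length ≤ l.foldl (fun a x => a * (n + 1) + x.toNat) a ∧
      l.foldl (fun a x => a * (n + 1) + x.toNat) a < (a + 1) * (n + 1) ^ l.length := by
  induction l with
  | nil => intro a; simp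
  | cons x t ih =>
    intro a
    have hx : x.toNat ≤ n := hl x (by simp)
    obtain ⟨lo, hi⟩ := ih (fun y hy => hl y (by simp [hy])) (a * (n + 1) + x.toNat)
    simp only [List.foldl_cons, List.length_cons]
    constructor
    · calc a * (n + 1) ^ (t.length + 1) = (a * (n + 1)) * (n + 1) ^ t.length := by ring
        _ ≤ (a * (n + 1) + x.toNat) * (n + 1) ^ t.length := by
            exact Nat.mul_le_mul_right _ (by omega)
        _ ≤ _ := lo
    · calc t.foldl (fun a x => a * (n + 1) + x.toNat) (a * (n + 1) + x.toNat)
          < (a * (n + 1) + x.toNat + 1) * (n + 1) ^ t.length := hi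
        _ ≤ ((a + 1) * (n + 1)) * (n + 1) ^ t.length := by
            refine Nat.mul_le_mul_right _ ?_
            have hexp : (a + 1) * (n + 1) = a * (n + 1) + n + 1 := by ring
            omega
        _ = (a + 1) * (n + 1) ^ (t.length + 1) := by ring

theorem pvVal_lt_pow (n : Nat) (c : List Int) (h : ∀ x ∈ c, x.toNat ≤ n) :
    pvVal n c < (n + 1) ^ c.length := by
  have := (pvVal_foldl_bounds n c h 0).2
  simpa [pvVal] using this

theorem lexLt_cons_iff {x y : Int} {c d : List Int} :
    LexLt (x :: c) (y :: d) ↔ x < y ∨ (x = y ∧ LexLt c d) := by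
  constructor
  · rintro ⟨p, hpc, hpd, heq, hlt⟩
    cases p with
    | zero => left; simpa using hlt
    | succ q =>
      right
      refine ⟨by simpa using heq 0 (by omega), q, by simpa using hpc, by simpa using hpd, fun r hr => ?_, by simpa using hlt⟩
      have := heq (r + 1) (by omega)
      simpa using this
  · rintro (h | ⟨rfl, p, hpc, hpd, heq, hlt⟩)
    · exact ⟨0, by simp, by simp, fun q hq => by omega, by simpa using h⟩
    · refine ⟨p + 1, by simpa using hpc, by simpa using hpd, fun r hr => ?_, by simpa using hlt⟩
      cases r with
      | zero => simp
      | succ s => simpa using heq s (by omega)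

theorem pvVal_fold_mono (n : Nat) :
    ∀ (c d : List Int) (a : Nat), c.length = d.length →
    (∀ x ∈ c, 0 ≤ x ∧ x < (n : Int)) → (∀ x ∈ d, 0 ≤ x ∧ x < (n : Int)) →
    LexLt c d →
    c.foldl (fun a x => a * (n + 1) + x.toNat) a < d.foldl (fun a x => a * (n + 1) + x.toNat) a := by
  intro c
  induction c with
  | nil => rintro d a _ _ _ ⟨p, hp, _⟩; simp at hp
  | cons x t ih =>
    rintro (_ | ⟨y, s⟩) a hlen hcb hdb hlex
    · simp at hlen
    · rw [lexLt_cons_iff] at hlex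
      have hxb := hcb x (by simp)
      have hyb := hdb y (by simp)
      simp only [List.foldl_cons]
      have hlen' : t.length = s.length := by simpa using hlen
      rcases hlex with h | ⟨rfl, hlex⟩
      · have h1 := (pvVal_foldl_bounds n t (fun z hz => by have := hcb z (by simp [hz]); omega) (a * (n+1) + x.toNat)).2
        have h2 := (pvVal_foldl_bounds n s (fun z hz => by have := hdb z (by simp [hz]); omega) (a * (n+1) + y.toNat)).1
        rw [hlen'] at h1
        calc t.foldl (fun a x => a * (n + 1) + x.toNat) (a * (n+1) + x.toNat)
            < (a * (n+1) + x.toNat + 1) * (n + 1) ^ s.length := h1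
          _ ≤ (a * (n+1) + y.toNat) * (n + 1) ^ s.length := Nat.mul_le_mul_right _ (by omega)
          _ ≤ _ := h2
      · exact ih s (a * (n+1) + x.toNat) hlen' (fun z hz => hcb z (by simp [hz]))
          (fun z hz => hdb z (by simp [hz])) hlex

theorem pvVal_lt_of_lexLt (n : Nat) (c d : List Int) (hlen : c.length = d.length)
    (hcb : ∀ x ∈ c, 0 ≤ x ∧ x < (n : Int)) (hdb : ∀ x ∈ d, 0 ≤ x ∧ x < (n : Int))
    (h : LexLt c d) : pvVal n c < pvVal n d :=
  pvVal_fold_mono n c d 0 hlen hcb hdb h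

theorem getD_ext {c d : List Int} (hlen : c.length = d.length)
    (h : ∀ j : Nat, j < c.length → c.getD j 0 = d.getD j 0) : c = d := by
  apply List.ext_getElem hlen
  intro j h1 h2
  have := h j h1
  rwa [List.getD_eq_getElem _ _ h1, List.getD_eq_getElem _ _ h2] at this

theorem bump_isComb {n kt : Nat} {c : List Int} (hc : IsComb n kt c) {i : Int}
    (hi0 : 0 ≤ i) (hik : i < kt) (hmis : c.getD i.toNat 0 ≠ i + (n : Int) - kt) :
    IsComb n kt (pvBump c i (kt : Int)) := by
  obtain ⟨L, Pre, Post⟩ := bump_getD hc i hi0 hik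
  have hub := comb_ub hc i.toNat (by omega)
  have hci : c.getD i.toNat 0 < i + (n : Int) - kt := by
    rcases lt_or_eq_of_le hub with h | h
    · omega
    · exact absurd (by rw [h]; push_cast; omega) hmis
  refine ⟨L, fun p q hpq hq => ?_, fun p hp => ?_⟩
  · rcases lt_or_ge (q : Int) i with hq2 | hq2
    · rw [Pre p (by omega), Pre q (by omega)]
      exact hc.2.1 p q hpq hq
    · rw [Post q hq2 hq]
      rcases lt_or_ge (p : Int) i with hp2 | hp2
      · rw [Pre p hp2]
        have h1 := hc.2.1 p i.toNat (by omega) (by omega)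
        omega
      · rw [Post p hp2 (by omega)]
        omega
  · rcases lt_or_ge (p : Int) i with hp2 | hp2
    · rw [Pre p hp2]; exact hc.2.2 p hp
    · rw [Post p hp2 hp]
      have hb0 := (hc.2.2 i.toNat (by omega)).1
      constructor
      · omega
      · omega

theorem bump_lex {n kt : Nat} {c : List Int} (hc : IsComb n kt c) {i : Int}
    (hi0 : 0 ≤ i) (hik : i < kt) :
    LexLt c (pvBump c i (kt : Int)) := by
  obtain ⟨L, Pre, Post⟩ := bump_getD hc i hi0 hik
  refine ⟨i.toNat, by have := hc.1; omega, by rw [L]; omega, fun q hq => (Pre q (by omega)).symm, ?_⟩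
  rw [Post i.toNat (by omega) (by omega)]
  omega

theorem bump_min {n kt : Nat} {c : List Int} (hc : IsComb n kt c) {i : Int}
    (hi0 : 0 ≤ i) (hik : i < kt)
    (htail : ∀ j : Nat, i < (j : Int) → j < kt → c.getD j 0 = (j : Int) + n - kt)
    (c' : List Int) (hc' : IsComb n kt c') (hlex : LexLt c c') :
    c' = pvBump c i (kt : Int) ∨ LexLt (pvBump c i (kt : Int)) c' := by
  obtain ⟨L, Pre, Post⟩ := bump_getD hc i hi0 hik
  obtain ⟨p, hpc, hpc', heq, hlt⟩ := hlex
  rw [hc.1] at hpc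
  rw [hc'.1] at hpc'
  rcases Nat.lt_trichotomy p i.toNat with hp | hp | hp
  · right
    exact ⟨p, by omega, by rw [hc'.1]; omega, fun q hq => by rw [Pre q (by omega)]; exact heq q hq,
      by rw [Pre p (by omega)]; exact hlt⟩
  · -- p = i.toNat
    subst hp
    have hbp : (pvBump c i (kt : Int)).getD i.toNat 0 = c.getD i.toNat 0 + 1 := by
      rw [Post i.toNat (by omega) (by omega)]; omega
    rcases lt_or_ge ((pvBump c i (kt : Int)).getD i.toNat 0) (c'.getD i.toNat 0) with hstrict | hge
    · right
      exact ⟨i.toNat, by rw [L]; omega, by rw [hc'.1]; omega,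
        fun q hq => by rw [Pre q (by omega)]; exact heq q hq, hstrict⟩
    · have heqp : (pvBump c i (kt : Int)).getD i.toNat 0 = c'.getD i.toNat 0 := by omega
      by_cases hall : ∀ j : Nat, j < kt → (pvBump c i (kt : Int)).getD j 0 = c'.getD j 0
      · left
        exact (getD_ext (c := pvBump c i (kt : Int)) (d := c') (by rw [L, hc'.1])
          (fun j hj => hall j (by rw [L] at hj; exact hj))).symm
      · right
        push_neg at hall
        have hex : ∃ j : Nat, j < kt ∧ (pvBump c i (kt : Int)).getD j 0 ≠ c'.getD j 0 := hall
        classical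
        obtain ⟨hp0k, hp0ne⟩ : Nat.find hex < kt ∧ (pvBump c i (kt : Int)).getD (Nat.find hex) 0 ≠ c'.getD (Nat.find hex) 0 := Nat.find_spec hex
        set p0 := Nat.find hex with hp0def
        have hmin : ∀ q : Nat, q < p0 → q < kt → (pvBump c i (kt : Int)).getD q 0 = c'.getD q 0 := by
          intro q hq hqk
          by_contra hne
          exact absurd (Nat.find_min' hex ⟨hqk, hne⟩) (by omega)
        have hp0i : i.toNat < p0 := by
          rcases Nat.lt_or_ge i.toNat p0 with h | h
          · exact h
          · exfalso
            rcases Nat.eq_or_lt_of_le h with h' | h'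
            · exact hp0ne (by rw [h']; exact heqp)
            · rcases Nat.lt_or_ge p0 i.toNat with h2 | h2
              · exact hp0ne (by rw [Pre p0 (by omega)]; exact heq p0 (by omega))
              · omega
        refine ⟨p0, by rw [L]; omega, by rw [hc'.1]; omega, fun q hq => hmin q hq (by omega), ?_⟩
        have hb0 : (pvBump c i (kt : Int)).getD p0 0 = c.getD i.toNat 0 + 1 + ((p0 : Int) - i) :=
          Post p0 (by omega) hp0k
        have hgap := comb_gap hc' i.toNat p0 (by omega) hp0k
        have hcip : c'.getD i.toNat 0 = c.getD i.toNat 0 + 1 := by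
          rw [← heqp, Post i.toNat (by omega) (by omega)]; omega
        rw [hcip] at hgap
        omega
  · -- p > i.toNat: contradiction with the tail being maximal
    exfalso
    have hcp := htail p (by omega) hpc
    have hub := comb_ub hc' p hpc'
    omega

theorem max_no_lex {n kt : Nat} {c : List Int} (hclen : c.length = kt)
    (hfull : ∀ j : Nat, j < kt → c.getD j 0 = (j : Int) + n - kt)
    (c' : List Int) (hc' : IsComb n kt c') : ¬ LexLt c c' := by
  rintro ⟨p, hpc, hpc', heq, hlt⟩
  rw [hclen] at hpc
  have h1 := hfull p (by omega)
  have h2 := comb_ub hc' p (by rw [← hc'.1]; omega)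
  omega

theorem comb_mem_bounds {n kt : Nat} {c : List Int} (hc : IsComb n kt c) :
    ∀ x ∈ c, 0 ≤ x ∧ x < (n : Int) := by
  intro x hx
  obtain ⟨p, hp, rfl⟩ := List.mem_iff_getElem.mp hx
  have hpk : p < kt := by have := hc.1; omega
  have := hc.2.2 p hpk
  rwa [List.getD_eq_getElem _ _ hp] at this

theorem comb_val_lt {n kt : Nat} {c : List Int} (hc : IsComb n kt c) :
    pvVal n c < (n + 1) ^ kt := by
  have h := pvVal_lt_pow n c (fun x hx => by have := comb_mem_bounds hc x hx; omega)
  rwa [hc.1] at h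

theorem pvLoopA_spec (vs : List Int) (minL maxL : Int) (kt : Nat) :
    ∀ (fuel : Nat) (c : List Int), IsComb vs.length kt c →
    (vs.length + 1) ^ kt - pvVal vs.length c < fuel →
    (pvLoopA vs minL maxL (kt : Int) fuel c = true ↔
      ∃ c', IsComb vs.length kt c' ∧ LexLt c c' ∧
        validate_tracks_length_py vs c' minL maxL (kt : Int) = true) := by
  intro fuel
  induction fuel with
  | zero => intro c _ hfuel; exact absurd hfuel (by omega)
  | succ fuel ih =>
    intro c hc hfuel
    rw [pvLoopA]
    rcases hfb : pvFindBreak c (vs.length : Int) (kt : Int) with - | i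
    · -- no index to bump: c is the maximal combination
      have hfull : ∀ j : Nat, j < kt → c.getD j 0 = (j : Int) + vs.length - kt := by
        have hnone := (find_rev_none_iff _ kt).mp (by exact hfb)
        intro j hj
        have := hnone j hj
        simp only [Bool.not_eq_false', beq_iff_eq] at this
        rwa [pvGet_eq_getD _ _ (by omega), Int.toNat_natCast] at this
      refine iff_of_false (by simp) ?_
      rintro ⟨c', hc', hlex, -⟩
      exact max_no_lex hc.1 hfull c' hc' hlex
    · have hsome := (find_rev_some_iff _ kt i).mp (by exact hfb)
      obtain ⟨hi0, hik, hpi, hptail⟩ := hsome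
      have hmis : c.getD i.toNat 0 ≠ i + (vs.length : Int) - kt := by
        simp only [Bool.not_eq_true', beq_eq_false_iff_ne] at hpi
        rwa [pvGet_eq_getD _ _ hi0] at hpi
      have htail : ∀ j : Nat, i < (j : Int) → j < kt → c.getD j 0 = (j : Int) + vs.length - kt := by
        intro j h1 h2
        have := hptail j h1 (by push_cast; omega)
        simp only [Bool.not_eq_false', beq_iff_eq] at this
        rwa [pvGet_eq_getD _ _ (by omega), Int.toNat_natCast] at this
      have hnext := bump_isComb hc hi0 hik hmis
      have hlexnext := bump_lex hc hi0 hik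
      have hvlt := pvVal_lt_of_lexLt vs.length c (pvBump c i (kt : Int))
        (by rw [hc.1, hnext.1]) (comb_mem_bounds hc) (comb_mem_bounds hnext) hlexnext
      have hvbound := comb_val_lt hc
      show (if validate_tracks_length_py vs (pvBump c i (kt : Int)) minL maxL (kt : Int) = true then true
        else pvLoopA vs minL maxL (kt : Int) fuel (pvBump c i (kt : Int))) = true ↔ _
      by_cases hval : validate_tracks_length_py vs (pvBump c i (kt : Int)) minL maxL (kt : Int) = true
      · rw [if_pos hval]
        exact iff_of_true rfl ⟨pvBump c i (kt : Int), hnext, hlexnext, hval⟩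
      · rw [if_neg hval]
        rw [ih (pvBump c i (kt : Int)) hnext (by omega)]
        constructor
        · rintro ⟨c', h1, h2, h3⟩
          exact ⟨c', h1, lexLt_trans hlexnext h2 (by rw [hc.1, hnext.1]) (by rw [hnext.1, h1.1]), h3⟩
        · rintro ⟨c', h1, h2, h3⟩
          rcases bump_min hc hi0 hik htail c' h1 h2 with he | hlt
          · exact absurd (by rw [← he]; exact h3) hval
          · exact ⟨c', h1, hlt, h3⟩

def SpecSum (vs : List Int) (minL maxL : Int) (kt : Nat) : Prop :=
  ∃ t : List Int, t.Sublist vs ∧ t.length = kt ∧ minL ≤ t.sum ∧ t.sum ≤ maxL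

theorem validate_eq_decide (vs c : List Int) (minL maxL : Int) (kt : Nat) (hl : c.length = kt) :
    validate_tracks_length_py vs c minL maxL (kt : Int) =
      (decide (minL ≤ (c.map (pvGet vs)).sum) && decide ((c.map (pvGet vs)).sum ≤ maxL)) := by
  unfold validate_tracks_length_py
  have : ((kt : Int) == ((c.map (pvGet vs)).length : Int)) = true := by
    simp [List.length_map, hl]
  simp only [this, Bool.and_true]

theorem map_pvGet_eq (vs c : List Int) (hb : ∀ x ∈ c, 0 ≤ x ∧ x < (vs.length : Int)) :
    c.map (pvGet vs) = (c.pmap (fun x hx => (⟨x.toNat, by omega⟩ : Fin vs.length))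
      hb).map (fun i => vs[i]) := by
  apply List.ext_getElem
  · simp
  · intro p h1 h2
    have hp : p < c.length := by simpa using h1
    rw [List.getElem_map, List.getElem_map, List.getElem_pmap]
    have hbp := hb _ (List.getElem_mem hp)
    rw [pvGet_eq_getD _ _ hbp.1, List.getD_eq_getElem _ _ (by omega)]
    rfl

theorem comb_exists_iff_specSum (vs : List Int) (minL maxL : Int) (kt : Nat) :
    (∃ c, IsComb vs.length kt c ∧ validate_tracks_length_py vs c minL maxL (kt : Int) = true)
      ↔ SpecSum vs minL maxL kt := by
  constructor
  · rintro ⟨c, hc, hval⟩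
    have hb := comb_mem_bounds hc
    rw [validate_eq_decide vs c minL maxL kt hc.1] at hval
    simp only [Bool.and_eq_true, decide_eq_true_eq] at hval
    refine ⟨c.map (pvGet vs), ?_, by simp [hc.1], hval.1, hval.2⟩
    rw [map_pvGet_eq vs c hb]
    apply List.map_getElem_sublist
    rw [List.pairwise_pmap]
    rw [List.pairwise_iff_getElem]
    intro p q h1 h2 hpq
    intro hp1 hp2
    have hmono := hc.2.1 p q hpq (by have := hc.1; omega)
    rw [List.getD_eq_getElem _ _ h1, List.getD_eq_getElem _ _ h2] at hmono
    have b1 := hb _ (List.getElem_mem h1)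
    have b2 := hb _ (List.getElem_mem h2)
    simp only [Fin.mk_lt_mk]
    omega
  · rintro ⟨t, hsub, hlen, h1, h2⟩
    obtain ⟨is, hmap, hpair⟩ := List.sublist_eq_map_getElem hsub
    refine ⟨is.map (fun f => (f.val : Int)), ⟨by simp [← hlen, hmap], ?_, ?_⟩, ?_⟩
    · intro p q hpq hq
      have hliskt : is.length = kt := by rw [hmap] at hlen; simpa using hlen
      have hq' : q < is.length := by omega
      have hp' : p < is.length := by omega
      rw [List.getD_eq_getElem _ _ (by simpa using hp'), List.getD_eq_getElem _ _ (by simpa using hq')]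
      rw [List.pairwise_iff_getElem] at hpair
      have := hpair p q hp' hq' hpq
      simp only [List.getElem_map]
      exact_mod_cast this
    · intro p hp
      have hliskt : is.length = kt := by rw [hmap] at hlen; simpa using hlen
      have hp' : p < is.length := by omega
      rw [List.getD_eq_getElem _ _ (by simpa using hp')]
      simp only [List.getElem_map]
      constructor
      · positivity
      · exact_mod_cast is[p].isLt
    · have hmapeq : (is.map (fun f => (f.val : Int))).map (pvGet vs) = t := by
        rw [hmap]
        apply List.ext_getElem
        · simp
        · intro p ha hb2
          have hip : p < is.length := by simpa using hb2
          simp only [List.getElem_map]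
          have hlt : (is[p] : Fin vs.length).val < vs.length := Fin.isLt _
          rw [pvGet_eq_getD _ _ (by positivity), List.getD_eq_getElem _ _ (by simpa using hlt)]
          simp
      rw [validate_eq_decide vs _ minL maxL kt (by rw [hmap] at hlen; simpa using hlen), hmapeq]
      simp [h1, h2]

theorem init_getD (kt : Nat) (j : Nat) (hj : j < kt) :
    (PySem.List.pyRange 0 (kt : Int) 1).getD j 0 = (j : Int) := by
  have hlen : (PySem.List.pyRange 0 (kt : Int) 1).length = kt := by
    rw [PySem.List.length_pyRange_one]; omega
  rw [List.getD_eq_getElem _ _ (by omega), PySem.List.getElem_pyRange_one]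
  omega

theorem init_isComb (n kt : Nat) (hkn : kt ≤ n) :
    IsComb n kt (PySem.List.pyRange 0 (kt : Int) 1) := by
  refine ⟨by rw [PySem.List.length_pyRange_one]; omega, fun p q hpq hq => ?_, fun p hp => ?_⟩
  · rw [init_getD kt p (by omega), init_getD kt q hq]; omega
  · rw [init_getD kt p hp]; omega

theorem init_min {n kt : Nat} (c' : List Int) (hc' : IsComb n kt c')
    (hne : c' ≠ PySem.List.pyRange 0 (kt : Int) 1) :
    LexLt (PySem.List.pyRange 0 (kt : Int) 1) c' := by
  have hlen : (PySem.List.pyRange 0 (kt : Int) 1).length = kt := by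
    rw [PySem.List.length_pyRange_one]; omega
  have hex : ∃ j : Nat, j < kt ∧ (PySem.List.pyRange 0 (kt : Int) 1).getD j 0 ≠ c'.getD j 0 := by
    by_contra hall
    push_neg at hall
    apply hne
    exact (getD_ext (c := PySem.List.pyRange 0 (kt : Int) 1) (d := c') (by rw [hlen, hc'.1]) (fun j hj => hall j (by omega))).symm
  classical
  obtain ⟨hp0k, hp0ne⟩ := Nat.find_spec hex
  set p0 := Nat.find hex with hp0def
  have hmin : ∀ q : Nat, q < p0 → q < kt → (PySem.List.pyRange 0 (kt : Int) 1).getD q 0 = c'.getD q 0 := by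
    intro q hq hqk
    by_contra hne2
    exact absurd (Nat.find_min' hex ⟨hqk, hne2⟩) (by omega)
  refine ⟨p0, by omega, by rw [hc'.1]; omega, fun q hq => hmin q hq (by omega), ?_⟩
  have hgap := comb_gap hc' 0 p0 (by omega) hp0k
  have h0 := (hc'.2.2 0 (by omega)).1
  have hini := init_getD kt p0 hp0k
  rw [hini]
  rw [hini] at hp0ne
  omega

theorem A_core (vs : List Int) (minL maxL k : Int) :
    ((if (vs.length : Int) < k then false
      else if validate_tracks_length_py vs (PySem.List.pyRange 0 k 1) minL maxL k then true
      else pvLoopA vs minL maxL k ((vs.length + 1) ^ k.toNat + 1) (PySem.List.pyRange 0 k 1)) = true)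
      ↔ (0 ≤ k ∧ SpecSum vs minL maxL k.toNat) := by
  rcases lt_or_ge k 0 with hk | hk
  · -- negative count: everything is empty and the count check fails
    apply iff_of_false
    · rw [if_neg (by omega)]
      have hinit : PySem.List.pyRange 0 k 1 = [] := PySem.List.pyRange_one_eq_nil (by omega)
      rw [hinit]
      have hval : validate_tracks_length_py vs [] minL maxL k = false := by
        simp [validate_tracks_length_py]
        omega
      rw [hval]
      simp only [Bool.false_eq_true, if_false]
      show pvLoopA vs minL maxL k ((vs.length + 1) ^ k.toNat + 1) [] = true → False
      rw [pvLoopA]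
      have : pvFindBreak [] (vs.length : Int) k = none := by
        unfold pvFindBreak
        rw [PySem.List.pyRange_one_eq_nil (by omega)]
        rfl
      rw [this]
      simp
    · rintro ⟨h0, -⟩; omega
  · obtain ⟨kt, rfl⟩ : ∃ kt : Nat, k = (kt : Int) := ⟨k.toNat, by omega⟩
    rw [Int.toNat_natCast]
    rcases lt_or_ge (vs.length : Int) (kt : Int) with hn | hn
    · rw [if_pos hn]
      apply iff_of_false (by simp)
      rintro ⟨-, t, hsub, hlent, -⟩
      have := hsub.length_le
      omega
    · rw [if_neg (by omega)]
      have hcomb := init_isComb vs.length kt (by omega)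
      rw [← comb_exists_iff_specSum vs minL maxL kt]
      by_cases hv : validate_tracks_length_py vs (PySem.List.pyRange 0 (kt : Int) 1) minL maxL (kt : Int) = true
      · rw [if_pos hv]
        exact iff_of_true rfl ⟨by omega, PySem.List.pyRange 0 (kt : Int) 1, hcomb, hv⟩
      · rw [if_neg hv]
        rw [pvLoopA_spec vs minL maxL kt _ _ hcomb (by omega)]
        constructor
        · rintro ⟨c', h1, h2, h3⟩
          exact ⟨by omega, c', h1, h3⟩
        · rintro ⟨-, c', h1, h3⟩
          by_cases he : c' = PySem.List.pyRange 0 (kt : Int) 1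
          · exact absurd (he ▸ h3) hv
          · exact ⟨c', h1, init_min c' h1 he, h3⟩

def Reach (p : List Int) (j : Nat) (s : Int) : Prop :=
  ∃ t : List Int, t.Sublist p ∧ t.length = j ∧ t.sum = s

theorem sublist_concat_iff (t p : List Int) (x : Int) :
    t.Sublist (p ++ [x]) ↔ t.Sublist p ∨ ∃ r, t = r ++ [x] ∧ r.Sublist p := by
  rw [← List.reverse_sublist, List.reverse_append]
  simp only [List.reverse_singleton, List.singleton_append, List.sublist_cons_iff]
  constructor
  · rintro (h | ⟨r, hr, hsub⟩)
    · left; rwa [List.reverse_sublist] at h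
    · right
      exact ⟨r.reverse, by rw [← List.reverse_reverse t, hr]; simp, by rwa [← List.reverse_sublist, List.reverse_reverse]⟩
  · rintro (h | ⟨r, rfl, hsub⟩)
    · left; rwa [List.reverse_sublist]
    · right; exact ⟨r.reverse, by simp, by rwa [List.reverse_sublist]⟩

theorem reach_concat (p : List Int) (x : Int) (j : Nat) (s : Int) :
    Reach (p ++ [x]) j s ↔ Reach p j s ∨ (1 ≤ j ∧ Reach p (j - 1) (s - x)) := by
  constructor
  · rintro ⟨t, hsub, hlen, hsum⟩
    rcases (sublist_concat_iff t p x).mp hsub with h | ⟨r, rfl, hr⟩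
    · exact Or.inl ⟨t, h, hlen, hsum⟩
    · right
      refine ⟨by simp at hlen; omega, r, hr, by simp at hlen; omega, by simp at hsum; omega⟩
  · rintro (⟨t, hsub, hlen, hsum⟩ | ⟨hj, t, hsub, hlen, hsum⟩)
    · exact ⟨t, (sublist_concat_iff t p x).mpr (Or.inl hsub), hlen, hsum⟩
    · refine ⟨t ++ [x], (sublist_concat_iff _ p x).mpr (Or.inr ⟨t, rfl, hsub⟩), by simp; omega, by simp; omega⟩

theorem stepB_getD (L : List (PySem.Set Int)) (x : Int) (hL : L ≠ []) :
    (pvStepB x L).length = L.length ∧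
    (pvStepB x L).getD 0 PySem.Set.empty = L.getD 0 PySem.Set.empty ∧
    (∀ j : Nat, 1 ≤ j → j < L.length →
      (pvStepB x L).getD j PySem.Set.empty =
        PySem.Set.union (L.getD j PySem.Set.empty) ((L.getD (j-1) PySem.Set.empty).map (fun s => s + x))) := by
  match L with
  | [] => exact absurd rfl hL
  | l0 :: rest =>
    refine ⟨?_, rfl, ?_⟩
    · show (l0 :: List.zipWith _ (l0 :: rest) rest).length = (l0 :: rest).length
      simp [List.length_zipWith]
    · intro j h1 h2
      show (l0 :: List.zipWith _ (l0 :: rest) rest).getD j PySem.Set.empty = _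
      obtain ⟨j', rfl⟩ : ∃ j', j = j' + 1 := ⟨j - 1, by omega⟩
      have hzlen : (List.zipWith (fun prev cur => PySem.Set.union cur (prev.map (fun s => s + x))) (l0 :: rest) rest).length = rest.length := by
        simp [List.length_zipWith]
      have hj' : j' < rest.length := by simp at h2; omega
      rw [List.getD_cons_succ, List.getD_eq_getElem _ _ (by omega), List.getElem_zipWith]
      rw [List.getD_eq_getElem _ _ (by simp; omega), List.getD_eq_getElem _ _ (by simp; omega)]
      simp

theorem B_invariant (kt : Nat) (p : List Int) :
    (p.foldl (fun l x => pvStepB x l)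
        (PySem.Set.ofList [(0 : Int)] :: (List.range kt).map (fun _ => (PySem.Set.empty : PySem.Set Int)))).length = kt + 1 ∧
    (∀ j : Nat, j ≤ kt → ∀ s : Int,
      (s ∈ (p.foldl (fun l x => pvStepB x l)
        (PySem.Set.ofList [(0 : Int)] :: (List.range kt).map (fun _ => (PySem.Set.empty : PySem.Set Int)))).getD j PySem.Set.empty)
      ↔ Reach p j s) := by
  induction p using List.reverseRecOn with
  | nil =>
    refine ⟨by simp, fun j hj s => ?_⟩
    cases j with
    | zero =>
      simp only [List.foldl_nil, List.getD_cons_zero]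
      rw [PySem.Set.mem_ofList]
      constructor
      · intro h
        simp at h
        exact ⟨[], by simp, rfl, by simp [h]⟩
      · rintro ⟨t, hsub, hlen, hsum⟩
        have : t = [] := List.sublist_nil.mp hsub
        subst this
        simp at hsum
        simp [hsum.symm]
    | succ m =>
      simp only [List.foldl_nil, List.getD_cons_succ]
      rw [List.getD_eq_getElem _ _ (by simp; omega)]
      simp only [List.getElem_map]
      constructor
      · intro h; exact absurd h (by simp [PySem.Set.empty])
      · rintro ⟨t, hsub, hlen, -⟩
        have : t = [] := List.sublist_nil.mp hsub
        subst this
        simp at hlen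
  | append_singleton p x ih =>
    obtain ⟨ihL, ihM⟩ := ih
    rw [List.foldl_concat]
    set L := p.foldl (fun l x => pvStepB x l)
      (PySem.Set.ofList [(0 : Int)] :: (List.range kt).map (fun _ => (PySem.Set.empty : PySem.Set Int))) with hL
    obtain ⟨sL, s0, sj⟩ := stepB_getD L x (by intro h; rw [h] at ihL; simp at ihL)
    refine ⟨by rw [sL, ihL], fun j hj s => ?_⟩
    cases j with
    | zero =>
      rw [s0, ihM 0 (by omega) s, reach_concat]
      constructor
      · exact Or.inl
      · rintro (h | ⟨h1, -⟩)
        · exact h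
        · omega
    | succ m =>
      rw [sj (m+1) (by omega) (by omega), PySem.Set.mem_union, reach_concat]
      constructor
      · rintro (h | h)
        · exact Or.inl ((ihM (m+1) hj s).mp h)
        · right
          obtain ⟨u, hu, hus⟩ := List.mem_map.mp h
          refine ⟨by omega, ?_⟩
          have := (ihM m (by omega) u).mp (by simpa using hu)
          simpa [show s - x = u by omega] using this
      · rintro (h | ⟨-, h⟩)
        · exact Or.inl ((ihM (m+1) hj s).mpr h)
        · right
          apply List.mem_map.mpr
          refine ⟨s - x, ?_, by omega⟩
          simpa using (ihM m (by omega) (s - x)).mpr h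

theorem B_core (vs : List Int) (minL maxL k : Int) :
    ((if k < 0 then false
      else if (vs.length : Int) < k then false
      else ((PySem.List.pyGet? (vs.foldl (fun l x => pvStepB x l)
          (PySem.Set.ofList [(0 : Int)] :: (List.range k.toNat).map (fun _ => (PySem.Set.empty : PySem.Set Int)))) k).getD
            PySem.Set.empty).any (fun s => decide (minL ≤ s) && decide (s ≤ maxL))) = true)
    ↔ (0 ≤ k ∧ SpecSum vs minL maxL k.toNat) := by
  rcases lt_or_ge k 0 with hk | hk
  · rw [if_pos hk]
    exact iff_of_false (by simp) (by rintro ⟨h, -⟩; omega)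
  · rw [if_neg (by omega)]
    obtain ⟨kt, rfl⟩ : ∃ kt : Nat, k = (kt : Int) := ⟨k.toNat, by omega⟩
    rw [Int.toNat_natCast]
    rcases lt_or_ge (vs.length : Int) (kt : Int) with hn | hn
    · rw [if_pos hn]
      apply iff_of_false (by simp)
      rintro ⟨-, t, hsub, hlent, -⟩
      have := hsub.length_le
      omega
    · rw [if_neg (by omega)]
      obtain ⟨invL, invM⟩ := B_invariant kt vs
      set L := vs.foldl (fun l x => pvStepB x l)
        (PySem.Set.ofList [(0 : Int)] :: (List.range kt).map (fun _ => (PySem.Set.empty : PySem.Set Int))) with hLdef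
      have hget : PySem.List.pyGet? L (kt : Int) = some (L.getD kt PySem.Set.empty) := by
        rw [PySem.List.pyGet?_natCast, List.getElem?_eq_getElem (by omega), List.getD_eq_getElem _ _ (by omega)]
      rw [hget]
      simp only [Option.getD_some]
      rw [List.any_eq_true]
      constructor
      · rintro ⟨s, hmem, hpred⟩
        simp only [Bool.and_eq_true, decide_eq_true_eq] at hpred
        obtain ⟨t, hsub, hlen, hsum⟩ := (invM kt (by omega) s).mp hmem
        exact ⟨by omega, t, hsub, hlen, by omega, by omega⟩
      · rintro ⟨-, t, hsub, hlen, h1, h2⟩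
        refine ⟨t.sum, (invM kt (by omega) t.sum).mpr ⟨t, hsub, hlen, rfl⟩, by simp [h1, h2]⟩

theorem AB_eq (tracks_length : List Int) (min_length max_length tracks_count : Int) :
    check_tracks_length_py tracks_length min_length max_length tracks_count =
      check_tracks_length_py_alt tracks_length min_length max_length tracks_count := by
  rw [Bool.eq_iff_iff]
  set vs := if tracks_count == 1 then tracks_length.filter (fun x => decide (x ≤ max_length))
            else tracks_length.filter (fun x => decide (x < max_length)) with hvs
  have hA : check_tracks_length_py tracks_length min_length max_length tracks_count =
      (if (vs.length : Int) < tracks_count then false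
       else if validate_tracks_length_py vs (PySem.List.pyRange 0 tracks_count 1) min_length max_length tracks_count then true
       else pvLoopA vs min_length max_length tracks_count ((vs.length + 1) ^ tracks_count.toNat + 1) (PySem.List.pyRange 0 tracks_count 1)) := rfl
  have hB : check_tracks_length_py_alt tracks_length min_length max_length tracks_count =
      (if tracks_count < 0 then false
       else if (vs.length : Int) < tracks_count then false
       else ((PySem.List.pyGet? (vs.foldl (fun l x => pvStepB x l)
          (PySem.Set.ofList [(0 : Int)] :: (List.range tracks_count.toNat).map (fun _ => (PySem.Set.empty : PySem.Set Int)))) tracks_count).getD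
            PySem.Set.empty).any (fun s => decide (min_length ≤ s) && decide (s ≤ max_length))) := rfl
  rw [hA, hB, A_core, B_core]

-- ===== VERDICT (by name: the statement is the Claim_ definition above) =====
theorem check_tracks_length_py_spec : Claim_equal_check_tracks_length_py := by
  intro tracks_length min_length max_length tracks_count _
  show check_tracks_length_py tracks_length min_length max_length tracks_count =
    check_tracks_length_py_alt tracks_length min_length max_length tracks_count
  exact AB_eq tracks_length min_length max_length tracks_count
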